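-- pv_equiv track=rewrite | github.com/Sakshi-SC/compare-breakpoints-at-WGS-and-RNA-level | compare_breakpoint.py | compare_breakpoints
-- ===== SOURCE A (Python) =====
-- def compare_breakpoints(bd_breakpoints, sf_breakpoints, threshold):
--     matched_pairs = []
--     for bd_bp in bd_breakpoints:
--         for sf_bp in sf_breakpoints:
--             #if bd_bp[0] == sf_bp[0] and bd_bp[2] == sf_bp[2]:
--                 dist1 = abs(bd_bp[1] - sf_bp[1])
--                 dist2 = abs(bd_bp[3] - sf_bp[3])
--                 if dist1 <= threshold and dist2 <= threshold:
--                     matched_pairs.append((bd_bp, sf_bp))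
--     return matched_pairs
-- ===== SOURCE B (Python) =====
-- def _bisect_left(a, x):
--     lo, hi = 0, len(a)
--     while lo < hi:
--         mid = (lo + hi) // 2
--         if a[mid] < x:
--             lo = mid + 1
--         else:
--             hi = mid
--     return lo
--
--
-- def _bisect_right(a, x):
--     lo, hi = 0, len(a)
--     while lo < hi:
--         mid = (lo + hi) // 2
--         if x < a[mid]:
--             hi = mid
--         else:
--             lo = mid + 1
--     return lo
--
--
-- def compare_breakpoints(bd_breakpoints, sf_breakpoints, threshold):
--     # Index sf_breakpoints by coord1: indices sorted by sf[k][1], plus the sorted key list.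
--     order = sorted(range(len(sf_breakpoints)), key=lambda k: sf_breakpoints[k][1])
--     keys = [sf_breakpoints[k][1] for k in order]
--     matched_pairs = []
--     for bd_bp in bd_breakpoints:
--         lo = _bisect_left(keys, bd_bp[1] - threshold)
--         hi = _bisect_right(keys, bd_bp[1] + threshold)
--         cand = [j for j in order[lo:hi]
--                 if abs(bd_bp[3] - sf_breakpoints[j][3]) <= threshold]
--         cand.sort()  # restore original sf order among the matches
--         for j in cand:
--             matched_pairs.append((bd_bp, sf_breakpoints[j]))
--     return matched_pairs
-- ===== Notes on version B (the rewrite author's own statement) =====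
-- stated objective: alternative
-- what changed: Instead of scanning all sf_breakpoints for every bd_breakpoint, B pre-sorts sf indices by coord1 and binary-searches the threshold window per bd, filtering only those candidates by coord3 and re-sorting the hit indices to restore A's output order.
import Mathlib
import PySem

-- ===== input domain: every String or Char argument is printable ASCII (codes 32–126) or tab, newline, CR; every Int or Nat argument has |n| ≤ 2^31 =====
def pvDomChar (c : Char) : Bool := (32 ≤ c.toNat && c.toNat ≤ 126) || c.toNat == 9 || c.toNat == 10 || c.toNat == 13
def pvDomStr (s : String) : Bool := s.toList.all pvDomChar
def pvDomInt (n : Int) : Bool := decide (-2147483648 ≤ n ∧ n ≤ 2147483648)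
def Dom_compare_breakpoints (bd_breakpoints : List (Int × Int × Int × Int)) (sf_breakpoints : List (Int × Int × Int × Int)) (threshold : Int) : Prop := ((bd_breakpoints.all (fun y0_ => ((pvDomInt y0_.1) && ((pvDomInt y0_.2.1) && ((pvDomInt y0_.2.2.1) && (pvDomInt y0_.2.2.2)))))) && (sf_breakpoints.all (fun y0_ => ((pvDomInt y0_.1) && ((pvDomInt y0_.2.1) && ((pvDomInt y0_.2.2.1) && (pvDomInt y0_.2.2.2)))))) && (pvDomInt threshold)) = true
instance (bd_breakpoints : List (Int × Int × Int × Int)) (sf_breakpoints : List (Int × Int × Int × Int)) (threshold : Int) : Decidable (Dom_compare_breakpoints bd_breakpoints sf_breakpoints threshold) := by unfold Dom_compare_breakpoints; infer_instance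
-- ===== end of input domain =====

-- ===== PORT A =====
-- A: nested scan over bd_breakpoints × sf_breakpoints, appending pairs within threshold on both coords.
def compare_breakpoints (bd_breakpoints : List (Int × Int × Int × Int)) (sf_breakpoints : List (Int × Int × Int × Int)) (threshold : Int) : List ((Int × Int × Int × Int) × (Int × Int × Int × Int)) :=
  bd_breakpoints.foldl (fun matched_pairs bd_bp =>
    sf_breakpoints.foldl (fun acc sf_bp =>
      let dist1 := |bd_bp.2.1 - sf_bp.2.1|
      let dist2 := |bd_bp.2.2.2 - sf_bp.2.2.2|
      if dist1 ≤ threshold ∧ dist2 ≤ threshold then acc ++ [(bd_bp, sf_bp)] else acc)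
      matched_pairs) []

-- ===== PORT B =====
-- B: index sf_breakpoints by coord1 (sort indices once),
-- binary-search the [bd1-t, bd1+t] window per bd, filter candidates by coord3, re-sort hit
-- indices to restore A's output order.  _bisect_left/_bisect_right in Source B are the standard
-- bisect loops = PySem.List.bisectLeft / bisectRight.
def compare_breakpoints_alt (bd_breakpoints : List (Int × Int × Int × Int)) (sf_breakpoints : List (Int × Int × Int × Int)) (threshold : Int) : List ((Int × Int × Int × Int) × (Int × Int × Int × Int)) :=
  let order := PySem.List.sorted (List.range sf_breakpoints.length)
      (fun k => (sf_breakpoints.getD k (0,0,0,0)).2.1)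
  let keys := order.map (fun k => (sf_breakpoints.getD k (0,0,0,0)).2.1)
  bd_breakpoints.foldl (fun matched_pairs bd_bp =>
    let lo := PySem.List.bisectLeft keys (bd_bp.2.1 - threshold)
    let hi := PySem.List.bisectRight keys (bd_bp.2.1 + threshold)
    let cand := ((order.drop lo).take (hi - lo)).filter
        (fun j => decide (|bd_bp.2.2.2 - (sf_breakpoints.getD j (0,0,0,0)).2.2.2| ≤ threshold))
    (PySem.List.sorted cand (fun j => j)).foldl
      (fun acc j => acc ++ [(bd_bp, sf_breakpoints.getD j (0,0,0,0))]) matched_pairs) []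

-- ===== PRECONDITION & SPEC =====
def Spec_compare_breakpoints (bd_breakpoints : List (Int × Int × Int × Int)) (sf_breakpoints : List (Int × Int × Int × Int)) (threshold : Int) (out : List ((Int × Int × Int × Int) × (Int × Int × Int × Int))) : Prop := out = compare_breakpoints_alt bd_breakpoints sf_breakpoints threshold
instance (bd_breakpoints : List (Int × Int × Int × Int)) (sf_breakpoints : List (Int × Int × Int × Int)) (threshold : Int) (out : List ((Int × Int × Int × Int) × (Int × Int × Int × Int))) : Decidable (Spec_compare_breakpoints bd_breakpoints sf_breakpoints threshold out) := by unfold Spec_compare_breakpoints; infer_instance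

-- ===== CLAIM (what is proved, stated in full; the proofs are below) =====
def Claim_equal_compare_breakpoints : Prop := ∀ (bd_breakpoints : List (Int × Int × Int × Int)) (sf_breakpoints : List (Int × Int × Int × Int)) (threshold : Int), Dom_compare_breakpoints bd_breakpoints sf_breakpoints threshold → Spec_compare_breakpoints bd_breakpoints sf_breakpoints threshold (compare_breakpoints bd_breakpoints sf_breakpoints threshold)

-- ===== LEMMAS AND PROOFS =====

-- the match predicate shared by both programs
def pvMatch (t : Int) (b s : Int × Int × Int × Int) : Bool :=
  decide (|b.2.1 - s.2.1| ≤ t ∧ |b.2.2.2 - s.2.2.2| ≤ t)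

def pvKey (sf : List (Int × Int × Int × Int)) (k : Nat) : Int := (sf.getD k (0,0,0,0)).2.1

def pvOrder (sf : List (Int × Int × Int × Int)) : List Nat :=
  PySem.List.sorted (List.range sf.length) (pvKey sf)

def pvKeys (sf : List (Int × Int × Int × Int)) : List Int := (pvOrder sf).map (pvKey sf)

def pvCand (sf : List (Int × Int × Int × Int)) (t : Int) (b : Int × Int × Int × Int) : List Nat :=
  (((pvOrder sf).drop (PySem.List.bisectLeft (pvKeys sf) (b.2.1 - t))).take
      (PySem.List.bisectRight (pvKeys sf) (b.2.1 + t) - PySem.List.bisectLeft (pvKeys sf) (b.2.1 - t))).filter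
    (fun j => decide (|b.2.2.2 - (sf.getD j (0,0,0,0)).2.2.2| ≤ t))

lemma A_flat (bd sf : List (Int × Int × Int × Int)) (t : Int) :
    compare_breakpoints bd sf t
      = bd.flatMap (fun b => (sf.filter (pvMatch t b)).map (fun s => (b, s))) := by
  have hinner : ∀ (b : Int × Int × Int × Int) (acc : List ((Int × Int × Int × Int) × (Int × Int × Int × Int))),
      sf.foldl (fun acc s =>
        let dist1 := |b.2.1 - s.2.1|
        let dist2 := |b.2.2.2 - s.2.2.2|
        if dist1 ≤ t ∧ dist2 ≤ t then acc ++ [(b, s)] else acc) acc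
        = acc ++ (sf.filter (pvMatch t b)).map (fun s => (b, s)) := by
    intro b acc
    induction sf generalizing acc with
    | nil => simp
    | cons s tl ih =>
      by_cases h : |b.2.1 - s.2.1| ≤ t ∧ |b.2.2.2 - s.2.2.2| ≤ t
      · simp [List.filter_cons, pvMatch, h, ih, List.append_assoc]
      · simp [List.filter_cons, pvMatch, h, ih]
  unfold compare_breakpoints
  have hfun : (fun (matched_pairs : List ((Int × Int × Int × Int) × (Int × Int × Int × Int))) b =>
      sf.foldl (fun acc s =>
        let dist1 := |b.2.1 - s.2.1|
        let dist2 := |b.2.2.2 - s.2.2.2|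
        if dist1 ≤ t ∧ dist2 ≤ t then acc ++ [(b, s)] else acc) matched_pairs)
      = fun matched_pairs b => matched_pairs ++ (sf.filter (pvMatch t b)).map (fun s => (b, s)) := by
    funext acc b; exact hinner b acc
  rw [hfun, PySem.List.foldl_append_eq_flatMap]
  simp

lemma foldl_inner_flat {α β γ : Type} (bd : List α) (g : α → List β) (h : α → β → γ) :
    bd.foldl (fun mp b => (g b).foldl (fun acc j => acc ++ [h b j]) mp) []
      = bd.flatMap (fun b => (g b).map (h b)) := by
  have hfun : (fun (mp : List γ) b => (g b).foldl (fun acc j => acc ++ [h b j]) mp)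
      = fun mp b => mp ++ (g b).map (h b) := by
    funext mp b; exact PySem.List.foldl_append_singleton_eq_map _ _ _
  rw [hfun, PySem.List.foldl_append_eq_flatMap]; simp

lemma B_flat (bd sf : List (Int × Int × Int × Int)) (t : Int) :
    compare_breakpoints_alt bd sf t
      = bd.flatMap (fun b =>
          (PySem.List.sorted (pvCand sf t b) (fun j => j)).map
            (fun j => (b, sf.getD j (0,0,0,0)))) := by
  exact foldl_inner_flat bd
    (fun b => PySem.List.sorted (pvCand sf t b) (fun j => j))
    (fun b j => (b, sf.getD j (0,0,0,0)))

-- membership characterisation of the candidate list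
lemma order_perm (sf : List (Int × Int × Int × Int)) :
    (pvOrder sf).Perm (List.range sf.length) :=
  PySem.List.sorted_perm _ _ _

lemma order_nodup (sf : List (Int × Int × Int × Int)) : (pvOrder sf).Nodup :=
  (order_perm sf).nodup_iff.mpr List.nodup_range

lemma slice_mem (sf : List (Int × Int × Int × Int)) (lo hi : Nat) (j : Nat) :
    j ∈ ((pvOrder sf).drop lo).take (hi - lo)
      ↔ ∃ (p : Nat) (hp : p < (pvOrder sf).length), lo ≤ p ∧ p < hi ∧ (pvOrder sf)[p] = j := by
  constructor
  · intro hj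
    obtain ⟨q, hq, hget⟩ := List.mem_iff_getElem.mp hj
    have hq1 : q < hi - lo := lt_of_lt_of_le hq (by simp [List.length_take, List.length_drop])
    have hq2 : lo + q < (pvOrder sf).length := by
      have := hq
      simp [List.length_take, List.length_drop] at this
      omega
    refine ⟨lo + q, hq2, by omega, by omega, ?_⟩
    rw [← hget, List.getElem_take, List.getElem_drop]
  · rintro ⟨p, hp, h1, h2, hget⟩
    apply List.mem_iff_getElem.mpr
    refine ⟨p - lo, ?_, ?_⟩
    · simp only [List.length_take, List.length_drop]
      omega
    · rw [List.getElem_take, List.getElem_drop, ← hget]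
      congr 1
      omega

lemma cand_mem (sf : List (Int × Int × Int × Int)) (t : Int) (b : Int × Int × Int × Int) (j : Nat) :
    j ∈ pvCand sf t b ↔ j < sf.length ∧ pvMatch t b (sf.getD j (0,0,0,0)) = true := by
  have hperm := order_perm sf
  have hmemo : ∀ i, i ∈ pvOrder sf ↔ i < sf.length := fun i => by
    rw [hperm.mem_iff, List.mem_range]
  have hkeys_sorted : (pvKeys sf).Pairwise (· ≤ ·) :=
    PySem.List.sorted_map_key_pairwise (List.range sf.length) (pvKey sf)
  have hkeyslen : (pvKeys sf).length = (pvOrder sf).length := by simp [pvKeys]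
  obtain ⟨hlo_le, hlo1, hlo2⟩ :=
    PySem.List.bisectLeft_spec (pvKeys sf) (b.2.1 - t) hkeys_sorted
  obtain ⟨hhi_le, hhi1, hhi2⟩ :=
    PySem.List.bisectRight_spec (pvKeys sf) (b.2.1 + t) hkeys_sorted
  have hkget : ∀ (p : Nat) (hp : p < (pvOrder sf).length),
      (pvKeys sf)[p]'(hkeyslen ▸ hp) = pvKey sf ((pvOrder sf)[p]) := fun p hp =>
    List.getElem_map _
  have hwin : ∀ (p : Nat) (hp : p < (pvOrder sf).length),
      (PySem.List.bisectLeft (pvKeys sf) (b.2.1 - t) ≤ p ∧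
        p < PySem.List.bisectRight (pvKeys sf) (b.2.1 + t))
      ↔ (b.2.1 - t ≤ pvKey sf ((pvOrder sf)[p]) ∧ pvKey sf ((pvOrder sf)[p]) ≤ b.2.1 + t) := by
    intro p hp
    have hp' : p < (pvKeys sf).length := hkeyslen ▸ hp
    constructor
    · rintro ⟨h1, h2⟩
      refine ⟨?_, ?_⟩
      · have := hlo2 p hp' h1; rwa [hkget p hp] at this
      · have := hhi1 p hp' h2; rwa [hkget p hp] at this
    · rintro ⟨h1, h2⟩
      constructor
      · by_contra h
        have := hlo1 p hp' (by omega)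
        rw [hkget p hp] at this
        omega
      · by_contra h
        have := hhi2 p hp' (by omega)
        rw [hkget p hp] at this
        omega
  have hslice : ∀ i, i ∈ ((pvOrder sf).drop (PySem.List.bisectLeft (pvKeys sf) (b.2.1 - t))).take
        (PySem.List.bisectRight (pvKeys sf) (b.2.1 + t) - PySem.List.bisectLeft (pvKeys sf) (b.2.1 - t))
      ↔ i < sf.length ∧ b.2.1 - t ≤ pvKey sf i ∧ pvKey sf i ≤ b.2.1 + t := by
    intro i
    rw [slice_mem]
    constructor
    · rintro ⟨p, hp, h1, h2, hget⟩
      have hmem : i ∈ pvOrder sf := hget ▸ List.getElem_mem hp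
      refine ⟨(hmemo i).mp hmem, ?_⟩
      have := (hwin p hp).mp ⟨h1, h2⟩
      rwa [hget] at this
    · rintro ⟨hi, h1, h2⟩
      obtain ⟨p, hp, hget⟩ := List.mem_iff_getElem.mp ((hmemo i).mpr hi)
      have := (hwin p hp).mpr (by rw [hget]; exact ⟨h1, h2⟩)
      exact ⟨p, hp, this.1, this.2, hget⟩
  unfold pvCand
  rw [List.mem_filter, hslice j]
  simp only [pvMatch, pvKey, decide_eq_true_eq, abs_le]
  constructor
  · rintro ⟨⟨h0, h1, h2⟩, h3⟩
    exact ⟨h0, by omega, by omega⟩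
  · rintro ⟨h0, h1, h2⟩
    exact ⟨⟨h0, by omega, by omega⟩, by omega⟩

lemma cand_nodup (sf : List (Int × Int × Int × Int)) (t : Int) (b : Int × Int × Int × Int) :
    (pvCand sf t b).Nodup := by
  apply List.Nodup.filter
  exact ((List.take_sublist _ _).trans (List.drop_sublist _ _)).nodup (order_nodup sf)

lemma range_filter_map {α β : Type} (l : List α) (d : α) (q : α → Bool) (f : α → β) :
    (((List.range l.length).filter (fun j => q (l.getD j d))).map (fun j => f (l.getD j d)))
      = (l.filter q).map f := by
  induction l with
  | nil => simp
  | cons a tl ih =>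
    simp only [List.length_cons, List.range_succ_eq_map, List.filter_cons, List.filter_map,
      Function.comp_def, Nat.succ_eq_add_one, List.getD_cons_succ, List.getD_cons_zero]
    by_cases h : q a
    · simp only [h, if_true, List.map_cons]
      simpa [Function.comp_def] using ih
    · simp only [h, Bool.false_eq_true, if_false]
      simpa [Function.comp_def] using ih

lemma hits_eq (sf : List (Int × Int × Int × Int)) (t : Int) (b : Int × Int × Int × Int) :
    PySem.List.sorted (pvCand sf t b) (fun j => j)
      = (List.range sf.length).filter (fun j => pvMatch t b (sf.getD j (0,0,0,0))) := by
  apply PySem.List.sorted_eq_of_perm_of_pairwise_lt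
  · rw [List.perm_ext_iff_of_nodup (List.Nodup.filter _ (List.nodup_range)) (cand_nodup sf t b)]
    intro j
    rw [List.mem_filter, List.mem_range, cand_mem]
  · exact List.Pairwise.filter _ (List.pairwise_lt_range)

-- ===== VERDICT (by name: the statement is the Claim_ definition above) =====
theorem compare_breakpoints_spec : Claim_equal_compare_breakpoints := by
  intro bd sf t _
  unfold Spec_compare_breakpoints
  rw [A_flat, B_flat]
  apply List.flatMap_congr
  intro b _
  rw [hits_eq]
  exact (range_filter_map sf (0,0,0,0) (pvMatch t b) (fun s => (b, s))).symm
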